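-- pv_equiv track=rewrite | github.com/ejfn/advent-of-code | 2019/25/day25.py | parse_doors
-- ===== SOURCE A (Python) =====
-- def parse_doors(text):
--     doors = []
--     lines = text.splitlines()
--     in_doors = False
--     for line in lines:
--         if line.startswith('Doors here lead:'):
--             in_doors = True
--             continue
--         if in_doors:
--             if line.startswith('- '):
--                 doors.append(line[2:])
--             elif line.strip() == '':
--                 in_doors = False
--     return doors
-- ===== SOURCE B (Python) =====
-- def parse_doors(text):
--     lines = text.splitlines()
--     doors = []
--     i = 0
--     n = len(lines)
--     while i < n:
--         if lines[i].startswith('Doors here lead:'):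
--             i += 1
--             while i < n:
--                 line = lines[i]
--                 if line.startswith('- '):
--                     doors.append(line[2:])
--                 elif line.strip() == '':
--                     break
--                 i += 1
--             # i now sits on the blank line that ended the block (or == n);
--             # the outer i += 1 resumes the marker search just after it
--         i += 1
--     return doors
-- ===== Notes on version B (the rewrite author's own statement) =====
-- stated objective: alternative
-- what changed: Replaces A's single sweep carrying an in_doors boolean flag with a two-level decomposition: an outer loop searching for the 'Doors here lead:' marker and an inner loop collecting '- ' lines of the block (skipping other text) until a whitespace-only line, resuming the outer search after the block.
import Mathlib
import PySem

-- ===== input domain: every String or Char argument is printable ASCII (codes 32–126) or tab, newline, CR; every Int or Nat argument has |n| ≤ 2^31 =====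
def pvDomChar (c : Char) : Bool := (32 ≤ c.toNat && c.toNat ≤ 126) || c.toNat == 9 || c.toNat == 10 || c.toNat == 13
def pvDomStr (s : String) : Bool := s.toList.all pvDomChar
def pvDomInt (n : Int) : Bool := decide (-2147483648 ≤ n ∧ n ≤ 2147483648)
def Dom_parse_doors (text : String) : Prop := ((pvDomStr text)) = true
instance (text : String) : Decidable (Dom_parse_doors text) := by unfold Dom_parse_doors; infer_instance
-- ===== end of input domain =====

-- B replaces A's boolean-flag sweep by a marker-search outer loop with an inner block-collecting loop (alternative decomposition, same cost).

-- ===== PORT A =====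
-- one pass over the lines carrying (doors, in_doors), exactly A's branch order
def parse_doors_loop : List String → List String → Bool → List String
  | [], doors, _ => doors
  | line :: rest, doors, in_doors =>
    if PySem.Str.startswith line "Doors here lead:" then
      parse_doors_loop rest doors true
    else if in_doors then
      if PySem.Str.startswith line "- " then
        parse_doors_loop rest (doors ++ [PySem.Str.slice line (some 2) none]) in_doors
      else if PySem.Str.strip line == "" then
        parse_doors_loop rest doors false
      else
        parse_doors_loop rest doors in_doors
    else
      parse_doors_loop rest doors in_doors

def parse_doors (text : String) : List String :=
  parse_doors_loop (PySem.Str.splitlines text) [] false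

-- ===== PORT B =====
-- inner loop: collect '- ' lines, skip others, stop at a whitespace-only line;
-- returns the doors of the block and the lines after the blank terminator
def collectDoors : List String → List String × List String
  | [] => ([], [])
  | line :: rest =>
    if PySem.Str.startswith line "- " then
      (PySem.Str.slice line (some 2) none :: (collectDoors rest).1, (collectDoors rest).2)
    else if PySem.Str.strip line == "" then
      ([], rest)
    else
      collectDoors rest

theorem collectDoors_len : ∀ ls : List String, (collectDoors ls).2.length ≤ ls.length := by
  intro ls
  induction ls with
  | nil => simp [collectDoors]
  | cons l t ih =>
    simp only [collectDoors]
    split_ifs <;> simp <;> omega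

-- outer loop: search for the marker line, hand the following lines to collectDoors,
-- resume the search after the block
def scanDoors : List String → List String
  | [] => []
  | line :: rest =>
    if PySem.Str.startswith line "Doors here lead:" then
      (collectDoors rest).1 ++ scanDoors (collectDoors rest).2
    else
      scanDoors rest
termination_by ls => ls.length
decreasing_by
  · exact Nat.lt_succ_of_le (collectDoors_len rest)
  · simp

def parse_doors_alt (text : String) : List String :=
  scanDoors (PySem.Str.splitlines text)

-- ===== PRECONDITION & SPEC =====
def Spec_parse_doors (text : String) (out : List String) : Prop := out = parse_doors_alt text
instance (text : String) (out : List String) : Decidable (Spec_parse_doors text out) := by unfold Spec_parse_doors; infer_instance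

-- ===== CLAIM (what is proved, stated in full; the proofs are below) =====
def Claim_equal_parse_doors : Prop := ∀ (text : String), Dom_parse_doors text → Spec_parse_doors text (parse_doors text)

-- ===== LEMMAS AND PROOFS =====

-- a marker line does not start with '- '
theorem marker_not_dash (l : String)
    (h : PySem.Str.startswith l "Doors here lead:" = true) :
    PySem.Str.startswith l "- " = false := by
  simp only [PySem.Str.startswith_eq, PySem.Chars.startswith_iff] at h ⊢
  rw [Bool.eq_false_iff]
  intro hc
  rw [PySem.Chars.startswith_iff] at hc
  obtain ⟨t1, h1⟩ := h
  obtain ⟨t2, h2⟩ := hc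
  rw [← h2] at h1
  simp at h1

-- a marker line is not whitespace-only
theorem marker_not_blank (l : String)
    (h : PySem.Str.startswith l "Doors here lead:" = true) :
    (PySem.Str.strip l == "") = false := by
  simp only [PySem.Str.startswith_eq, PySem.Chars.startswith_iff] at h
  obtain ⟨t, ht⟩ := h
  rw [Bool.eq_false_iff]
  intro hc
  have hnil : PySem.Chars.strip l.toList = [] := by
    have h1 := (beq_iff_eq).mp hc
    have h2 : (PySem.Str.strip l).toList = [] := by simp [h1]
    rwa [PySem.Str.toList_strip] at h2
  have hD : 'D' ∈ l.toList := by rw [← ht]; simp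
  have hDns : PySem.Chars.isspace 'D' = false := by decide
  have hDl : 'D' ∈ PySem.Chars.lstrip l.toList := by
    have hsplit := List.takeWhile_append_dropWhile (p := PySem.Chars.isspace) (l := l.toList)
    rw [← hsplit] at hD
    rcases List.mem_append.mp hD with h1 | h2
    · have := List.mem_takeWhile_imp h1
      simp [hDns] at this
    · exact h2
  simp only [PySem.Chars.strip, PySem.Chars.rstrip, List.reverse_eq_nil_iff,
    List.dropWhile_eq_nil_iff] at hnil
  have := hnil 'D' (by simpa using hDl)
  simp [hDns] at this

theorem loop_eq_scan : ∀ (ls doors : List String),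
    (parse_doors_loop ls doors false = doors ++ scanDoors ls) ∧
    (parse_doors_loop ls doors true
      = doors ++ (collectDoors ls).1 ++ scanDoors (collectDoors ls).2) := by
  intro ls
  induction ls with
  | nil => intro doors; simp [parse_doors_loop, scanDoors, collectDoors]
  | cons line rest ih =>
    intro doors
    by_cases hm : PySem.Str.startswith line "Doors here lead:" = true
    · have hnd := ne_true_of_eq_false (marker_not_dash line hm)
      have hnb := ne_true_of_eq_false (marker_not_blank line hm)
      constructor
      · rw [parse_doors_loop, if_pos hm, scanDoors, if_pos hm]
        exact ((ih doors).2).trans (by simp)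
      · rw [parse_doors_loop, if_pos hm, collectDoors, if_neg hnd, if_neg hnb]
        exact (ih doors).2
    · constructor
      · rw [parse_doors_loop, if_neg hm, if_neg (by simp), scanDoors, if_neg hm]
        exact (ih doors).1
      · rw [parse_doors_loop, if_neg hm, if_pos rfl]
        by_cases hd : PySem.Str.startswith line "- " = true
        · rw [if_pos hd, collectDoors, if_pos hd]
          exact ((ih (doors ++ [PySem.Str.slice line (some 2) none])).2).trans (by simp)
        · rw [if_neg hd, collectDoors, if_neg hd]
          by_cases hb : (PySem.Str.strip line == "") = true
          · rw [if_pos hb, if_pos hb]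
            exact ((ih doors).1).trans (by simp)
          · rw [if_neg hb, if_neg hb]
            exact (ih doors).2

-- ===== VERDICT (by name: the statement is the Claim_ definition above) =====
theorem parse_doors_spec : Claim_equal_parse_doors := by
  intro text _
  unfold Spec_parse_doors parse_doors parse_doors_alt
  simpa using (loop_eq_scan (PySem.Str.splitlines text) []).1
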